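-- pv_equiv track=rewrite | github.com/rohjunha/multiple-topologies-prediction | custom_classes.py | get_behavior_pairs
-- ===== SOURCE A (Python) =====
-- def get_behavior_pairs(num_agents):
--     behaviors = ["cautious", "normal", "aggressive"]
--     pairs = [["cautious"], ["normal"], ["aggressive"]]
--     all_pairs = []
--     if num_agents == 2:
--         for agent_1 in pairs:
--             for agent_2 in behaviors:
--                 behavior = agent_1 + [agent_2]
--                 all_pairs.append(behavior)
--     if num_agents == 3:
--         for agent_1 in pairs:
--             for agent_2 in behaviors:
--                 for agent_3 in behaviors:
--                     behavior = agent_1 + [agent_2] + [agent_3]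
--                     all_pairs.append(behavior)
--     if num_agents == 4:
--         for agent_1 in pairs:
--             for agent_2 in behaviors:
--                 for agent_3 in behaviors:
--                     for agent_4 in behaviors:
--                         behavior = agent_1 + [agent_2] + [agent_3] + [agent_4]
--                         all_pairs.append(behavior)
--     return all_pairs
-- ===== SOURCE B (Python) =====
-- def get_behavior_pairs(num_agents):
--     behaviors = ["cautious", "normal", "aggressive"]
--     if not (2 <= num_agents <= 4):
--         return []
--     result = [["cautious"], ["normal"], ["aggressive"]]
--     for _ in range(num_agents - 1):
--         result = [r + [b] for r in result for b in behaviors]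
--     return result
-- ===== Notes on version B (the rewrite author's own statement) =====
-- stated objective: simpler
-- what changed: Replaces the three hardcoded nested-loop blocks (one per agent count 2/3/4) with a single accumulating product loop that extends the tuples num_agents-1 times.
import Mathlib
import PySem

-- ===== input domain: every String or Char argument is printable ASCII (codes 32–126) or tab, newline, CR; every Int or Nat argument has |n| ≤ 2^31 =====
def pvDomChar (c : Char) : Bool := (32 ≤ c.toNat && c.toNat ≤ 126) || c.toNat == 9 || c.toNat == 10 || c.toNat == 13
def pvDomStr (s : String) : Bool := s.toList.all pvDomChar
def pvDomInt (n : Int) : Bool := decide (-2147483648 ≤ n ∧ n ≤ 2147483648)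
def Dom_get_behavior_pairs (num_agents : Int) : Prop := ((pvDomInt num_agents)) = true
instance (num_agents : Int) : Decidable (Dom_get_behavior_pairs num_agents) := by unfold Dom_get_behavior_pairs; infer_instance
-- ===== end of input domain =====

-- B replaces A's three depth-hardcoded nested-loop blocks by one accumulating product loop over the agent count (objective: simpler).

-- ===== PORT A =====
-- Transliteration of A: explicit accumulator `all_pairs` threaded through three
-- depth-hardcoded nested loops, one per agent count.
def get_behavior_pairs (num_agents : Int) : List (List String) :=
  let behaviors : List String := ["cautious", "normal", "aggressive"]
  let pairs : List (List String) := [["cautious"], ["normal"], ["aggressive"]]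
  let all_pairs : List (List String) := []
  let all_pairs :=
    if num_agents = 2 then
      pairs.foldl (fun acc agent_1 =>
        behaviors.foldl (fun acc agent_2 =>
          acc ++ [agent_1 ++ [agent_2]]) acc) all_pairs
    else all_pairs
  let all_pairs :=
    if num_agents = 3 then
      pairs.foldl (fun acc agent_1 =>
        behaviors.foldl (fun acc agent_2 =>
          behaviors.foldl (fun acc agent_3 =>
            acc ++ [agent_1 ++ [agent_2] ++ [agent_3]]) acc) acc) all_pairs
    else all_pairs
  let all_pairs :=
    if num_agents = 4 then
      pairs.foldl (fun acc agent_1 =>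
        behaviors.foldl (fun acc agent_2 =>
          behaviors.foldl (fun acc agent_3 =>
            behaviors.foldl (fun acc agent_4 =>
              acc ++ [agent_1 ++ [agent_2] ++ [agent_3] ++ [agent_4]]) acc) acc) acc) all_pairs
    else all_pairs
  all_pairs

-- ===== PORT B =====
-- Transliteration of B: guard 2 <= n <= 4, then one product-extension loop run
-- num_agents - 1 times (the comprehension [r + [b] for r in result for b in behaviors]).
def get_behavior_pairs_alt (num_agents : Int) : List (List String) :=
  let behaviors : List String := ["cautious", "normal", "aggressive"]
  if 2 ≤ num_agents ∧ num_agents ≤ 4 then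
    (List.range (num_agents - 1).toNat).foldl
      (fun result _ => result.flatMap (fun r => behaviors.map (fun b => r ++ [b])))
      [["cautious"], ["normal"], ["aggressive"]]
  else []

-- ===== PRECONDITION & SPEC =====
def Spec_get_behavior_pairs (num_agents : Int) (out : List (List String)) : Prop := out = get_behavior_pairs_alt num_agents
instance (num_agents : Int) (out : List (List String)) : Decidable (Spec_get_behavior_pairs num_agents out) := by unfold Spec_get_behavior_pairs; infer_instance

-- ===== CLAIM (what is proved, stated in full; the proofs are below) =====
def Claim_equal_get_behavior_pairs : Prop := ∀ (num_agents : Int), Dom_get_behavior_pairs num_agents → Spec_get_behavior_pairs num_agents (get_behavior_pairs num_agents)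

-- ===== LEMMAS AND PROOFS =====

-- ===== VERDICT (by name: the statement is the Claim_ definition above) =====
set_option maxRecDepth 8192 in
theorem get_behavior_pairs_spec : Claim_equal_get_behavior_pairs := by
  intro n _
  unfold Spec_get_behavior_pairs
  by_cases h2 : n = 2
  · subst h2; decide
  · by_cases h3 : n = 3
    · subst h3; decide
    · by_cases h4 : n = 4
      · subst h4; decide
      · simp only [get_behavior_pairs, get_behavior_pairs_alt, if_neg h2, if_neg h3, if_neg h4]
        rw [if_neg]
        rintro ⟨hl, hr⟩
        interval_cases n <;> simp_all
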